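-- pv_equiv track=rewrite | github.com/Gokhan-04/dynamic-exam-scheduling-system | koltuk_atama.py | _koltuk_listesi
-- ===== SOURCE A (Python) =====
-- from typing import List, Dict, Tuple
--
-- def _koltuk_listesi(enine: int, boyuna: int, sira_yapisi: int = 2) -> List[Tuple[int, int]]:
--     """
--     Yan yana oturmamayı olabildiğince azaltmak için sütun gezişini sıra yapısına göre ayarlarız:
--     - 2'li: önce tek sütunlar (1,3,5,...) sonra çift sütunlar (2,4,6,...)
--     - 3'lü: 1,4,7,... → 2,5,8,... → 3,6,9,...
--     """
--     if enine <= 0 or boyuna <= 0: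
--         return []
--     sira_yapisi = 3 if int(sira_yapisi or 0) == 3 else 2
--
--     if sira_yapisi == 2:
--         tek_sutunlar = [c for c in range(1, enine + 1) if c % 2 == 1]
--         cift_sutunlar = [c for c in range(1, enine + 1) if c % 2 == 0]
--         sutun_sirasi = tek_sutunlar + cift_sutunlar
--     else:
--         g1 = list(range(1, enine + 1, 3))
--         g2 = list(range(2, enine + 1, 3))
--         g3 = list(range(3, enine + 1, 3))
--         sutun_sirasi = g1 + g2 + g3
--
--     koltuklar: List[Tuple[int, int]] = []
--     for sira in range(1, boyuna + 1):
--         for sut in sutun_sirasi: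
--             koltuklar.append((sira, sut))
--     return koltuklar
-- ===== SOURCE B (Python) =====
-- from typing import List, Tuple
--
-- def _koltuk_listesi(enine: int, boyuna: int, sira_yapisi: int = 2) -> List[Tuple[int, int]]:
--     # Generate the grid in plain row-major order, then SORT it into the serpentine
--     # order: rows first, then the column's residue group, columns breaking ties.
--     # rank(c) = ((c-1) % k) * enine + c is strictly increasing in (group, column),
--     # so a single sort (no stability needed) yields exactly the custom order.
--     if enine <= 0 or boyuna <= 0:
--         return []
--     k = 3 if int(sira_yapisi or 0) == 3 else 2
--     seats = [(r, c) for r in range(1, boyuna + 1) for c in range(1, enine + 1)]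
--     seats.sort(key=lambda rc: (rc[0], ((rc[1] - 1) % k) * enine + rc[1]))
--     return seats
-- ===== Notes on version B (the rewrite author's own statement) =====
-- stated objective: alternative
-- what changed: Instead of precomputing the odd/even or mod-3 column order and emitting seats group by group, B generates the whole grid in natural row-major order and sorts it once with the key (row, ((col-1)%k)*enine+col), letting the sort produce the serpentine order.
import Mathlib
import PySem

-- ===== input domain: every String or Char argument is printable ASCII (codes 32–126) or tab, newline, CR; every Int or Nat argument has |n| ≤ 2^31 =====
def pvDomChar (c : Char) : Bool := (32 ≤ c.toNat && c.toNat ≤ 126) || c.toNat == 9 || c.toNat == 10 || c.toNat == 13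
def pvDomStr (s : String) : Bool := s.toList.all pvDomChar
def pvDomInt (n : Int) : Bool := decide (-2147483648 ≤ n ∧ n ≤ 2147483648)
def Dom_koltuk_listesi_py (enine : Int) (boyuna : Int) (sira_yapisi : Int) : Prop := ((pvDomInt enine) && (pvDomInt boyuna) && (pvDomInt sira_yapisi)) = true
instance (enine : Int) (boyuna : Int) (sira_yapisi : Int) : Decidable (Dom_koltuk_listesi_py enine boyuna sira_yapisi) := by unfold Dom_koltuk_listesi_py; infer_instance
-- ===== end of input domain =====

-- B builds the grid in natural row-major order and sorts it once by the key
-- (row, ((col-1) % k) * enine + col) instead of emitting seats group by group; objective: alternative.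

-- ===== PORT A =====
def koltuk_listesi_py (enine : Int) (boyuna : Int) (sira_yapisi : Int) : List (Int × Int) :=
  if enine ≤ 0 ∨ boyuna ≤ 0 then []
  else
    -- sira_yapisi = 3 if int(sira_yapisi or 0) == 3 else 2
    let sy : Int := if (if sira_yapisi = 0 then (0 : Int) else sira_yapisi) = 3 then 3 else 2
    let sutun_sirasi : List Int :=
      if sy = 2 then
        ((PySem.List.pyRange 1 (enine + 1) 1).filter (fun c => PySem.Int.mod c 2 = 1)) ++
        ((PySem.List.pyRange 1 (enine + 1) 1).filter (fun c => PySem.Int.mod c 2 = 0))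
      else
        (PySem.List.pyRange 1 (enine + 1) 3) ++ (PySem.List.pyRange 2 (enine + 1) 3) ++
        (PySem.List.pyRange 3 (enine + 1) 3)
    (PySem.List.pyRange 1 (boyuna + 1) 1).foldl
      (fun koltuklar sira =>
        sutun_sirasi.foldl (fun acc sut => acc ++ [(sira, sut)]) koltuklar) []

-- ===== PORT B =====
def koltuk_listesi_py_alt (enine : Int) (boyuna : Int) (sira_yapisi : Int) : List (Int × Int) :=
  if enine ≤ 0 ∨ boyuna ≤ 0 then []
  else
    let k : Int := if (if sira_yapisi = 0 then (0 : Int) else sira_yapisi) = 3 then 3 else 2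
    let seats : List (Int × Int) :=
      (PySem.List.pyRange 1 (boyuna + 1) 1).flatMap (fun r =>
        (PySem.List.pyRange 1 (enine + 1) 1).map (fun c => (r, c)))
    -- seats.sort(key=lambda rc: (rc[0], ((rc[1]-1) % k) * enine + rc[1]))
    PySem.List.sorted2 seats (fun rc => rc.1)
      (fun rc => PySem.Int.mod (rc.2 - 1) k * enine + rc.2) false

-- ===== PRECONDITION & SPEC =====
def Spec_koltuk_listesi_py (enine : Int) (boyuna : Int) (sira_yapisi : Int) (out : List (Int × Int)) : Prop := out = koltuk_listesi_py_alt enine boyuna sira_yapisi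
instance (enine : Int) (boyuna : Int) (sira_yapisi : Int) (out : List (Int × Int)) : Decidable (Spec_koltuk_listesi_py enine boyuna sira_yapisi out) := by unfold Spec_koltuk_listesi_py; infer_instance

-- ===== CLAIM (what is proved, stated in full; the proofs are below) =====
def Claim_equal_koltuk_listesi_py : Prop := ∀ (enine : Int) (boyuna : Int) (sira_yapisi : Int), Dom_koltuk_listesi_py enine boyuna sira_yapisi → Spec_koltuk_listesi_py enine boyuna sira_yapisi (koltuk_listesi_py enine boyuna sira_yapisi)

-- ===== LEMMAS AND PROOFS =====

-- a Python sort with a 2-tuple key returns the (unique) rearrangement that is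
-- strictly increasing in the lexicographic order of the key, when one exists
theorem pv_sorted2_eq_of_perm_of_pairwise {α : Type} (xs ys : List α) (k1 k2 : α → Int)
    (hperm : ys.Perm xs)
    (hpw : ys.Pairwise (fun a b => k1 a < k1 b ∨ (k1 a = k1 b ∧ k2 a < k2 b))) :
    PySem.List.sorted2 xs k1 k2 false = ys := by
  have hkey : PySem.List.sorted2 xs k1 k2 false
      = PySem.List.sorted xs (fun x => toLex (k1 x, k2 x)) false := by
    have hbefore : (fun a b => decide (k1 a < k1 b) || (!decide (k1 b < k1 a) && decide (k2 a < k2 b)))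
        = (fun a b => decide (toLex (k1 a, k2 a) < toLex (k1 b, k2 b))) := by
      funext a b
      rw [Bool.eq_iff_iff]
      simp only [Bool.or_eq_true, Bool.and_eq_true, Bool.not_eq_true', decide_eq_true_eq,
        decide_eq_false_iff_not, Prod.Lex.toLex_lt_toLex]
      omega
    unfold PySem.List.sorted2 PySem.List.sorted
    simp only [Bool.false_eq_true, if_false, hbefore]
  rw [hkey]
  exact PySem.List.sorted_eq_of_perm_of_pairwise_lt xs ys _ hperm
    (hpw.imp (fun h => Prod.Lex.toLex_lt_toLex.mpr (by tauto)))

-- a positive-step pyRange is strictly increasing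
theorem pv_pairwise_pyRange_pos (a b : Int) {s : Int} (hs : 0 < s) :
    (PySem.List.pyRange a b s).Pairwise (· < ·) := by
  rw [PySem.List.pyRange_of_pos a b hs, List.pairwise_map]
  exact List.pairwise_lt_range.imp (fun h => by nlinarith)

-- ===== VERDICT (by name: the statement is the Claim_ definition above) =====
theorem koltuk_listesi_py_spec : Claim_equal_koltuk_listesi_py := by
  intro e b s _
  unfold Spec_koltuk_listesi_py koltuk_listesi_py koltuk_listesi_py_alt
  by_cases h : e ≤ 0 ∨ b ≤ 0
  · simp [h]
  · simp only [if_neg h]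
    push Not at h
    obtain ⟨he, hb⟩ := h
    set sy : Int := if (if s = 0 then (0 : Int) else s) = 3 then 3 else 2 with hsy
    have hsy23 : sy = 2 ∨ sy = 3 := by rw [hsy]; split_ifs <;> simp
    set cols : List Int :=
      (if sy = 2 then
        ((PySem.List.pyRange 1 (e + 1) 1).filter (fun c => PySem.Int.mod c 2 = 1)) ++
        ((PySem.List.pyRange 1 (e + 1) 1).filter (fun c => PySem.Int.mod c 2 = 0))
      else
        (PySem.List.pyRange 1 (e + 1) 3) ++ (PySem.List.pyRange 2 (e + 1) 3) ++
        (PySem.List.pyRange 3 (e + 1) 3)) with hcols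
    -- the rank of a column under B's sort key
    set rank : Int → Int := fun c => PySem.Int.mod (c - 1) sy * e + c with hrank
    -- A's column order is strictly increasing in rank
    have hcolpw : cols.Pairwise (fun a b => rank a < rank b) := by
      rcases hsy23 with h2 | h3
      · rw [hcols, if_pos h2]
        rw [List.pairwise_append]
        refine ⟨?_, ?_, ?_⟩
        · refine ((pv_pairwise_pyRange_pos 1 (e+1) one_pos).filter _).imp_of_mem ?_
          intro a c ha hc hac
          rw [List.mem_filter, decide_eq_true_eq] at ha hc
          have ra : PySem.Int.mod (a - 1) sy = 0 := by
            rw [h2, PySem.Int.mod_eq_emod_of_pos (by norm_num)]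
            rw [PySem.Int.mod_eq_emod_of_pos (by norm_num)] at ha
            omega
          have rc : PySem.Int.mod (c - 1) sy = 0 := by
            rw [h2, PySem.Int.mod_eq_emod_of_pos (by norm_num)]
            rw [PySem.Int.mod_eq_emod_of_pos (by norm_num)] at hc
            omega
          simp only [hrank, ra, rc]; omega
        · refine ((pv_pairwise_pyRange_pos 1 (e+1) one_pos).filter _).imp_of_mem ?_
          intro a c ha hc hac
          rw [List.mem_filter, decide_eq_true_eq] at ha hc
          have ra : PySem.Int.mod (a - 1) sy = 1 := by
            rw [h2, PySem.Int.mod_eq_emod_of_pos (by norm_num)]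
            rw [PySem.Int.mod_eq_emod_of_pos (by norm_num)] at ha
            omega
          have rc : PySem.Int.mod (c - 1) sy = 1 := by
            rw [h2, PySem.Int.mod_eq_emod_of_pos (by norm_num)]
            rw [PySem.Int.mod_eq_emod_of_pos (by norm_num)] at hc
            omega
          simp only [hrank, ra, rc]; omega
        · intro a ha c hc
          rw [List.mem_filter, decide_eq_true_eq, PySem.List.mem_pyRange_one] at ha hc
          have ra : PySem.Int.mod (a - 1) sy = 0 := by
            rw [h2, PySem.Int.mod_eq_emod_of_pos (by norm_num)]
            rw [PySem.Int.mod_eq_emod_of_pos (by norm_num)] at ha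
            omega
          have rc : PySem.Int.mod (c - 1) sy = 1 := by
            rw [h2, PySem.Int.mod_eq_emod_of_pos (by norm_num)]
            rw [PySem.Int.mod_eq_emod_of_pos (by norm_num)] at hc
            omega
          simp only [hrank, ra, rc]; omega
      · rw [hcols, if_neg (by rw [h3]; norm_num)]
        have hres : ∀ (g : Int), 1 ≤ g → g ≤ 3 → ∀ x ∈ PySem.List.pyRange g (e + 1) 3,
            PySem.Int.mod (x - 1) sy = g - 1 ∧ g ≤ x ∧ x ≤ e := by
          intro g hg1 hg3 x hx
          rw [PySem.List.mem_pyRange_iff_of_pos (by norm_num)] at hx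
          rw [h3, PySem.Int.mod_eq_emod_of_pos (by norm_num)]
          omega
        rw [List.pairwise_append]
        refine ⟨?_, ?_, ?_⟩
        · rw [List.pairwise_append]
          refine ⟨?_, ?_, ?_⟩
          · refine (pv_pairwise_pyRange_pos 1 (e+1) (by norm_num)).imp_of_mem ?_
            intro a c ha hc hac
            obtain ⟨ra, -⟩ := hres 1 (by norm_num) (by norm_num) a ha
            obtain ⟨rc, -⟩ := hres 1 (by norm_num) (by norm_num) c hc
            simp only [hrank, ra, rc]; omega
          · refine (pv_pairwise_pyRange_pos 2 (e+1) (by norm_num)).imp_of_mem ?_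
            intro a c ha hc hac
            obtain ⟨ra, -⟩ := hres 2 (by norm_num) (by norm_num) a ha
            obtain ⟨rc, -⟩ := hres 2 (by norm_num) (by norm_num) c hc
            simp only [hrank, ra, rc]; omega
          · intro a ha c hc
            obtain ⟨ra, -, hae⟩ := hres 1 (by norm_num) (by norm_num) a ha
            obtain ⟨rc, hc2, -⟩ := hres 2 (by norm_num) (by norm_num) c hc
            simp only [hrank, ra, rc]; omega
        · refine (pv_pairwise_pyRange_pos 3 (e+1) (by norm_num)).imp_of_mem ?_
          intro a c ha hc hac
          obtain ⟨ra, -⟩ := hres 3 (by norm_num) (by norm_num) a ha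
          obtain ⟨rc, -⟩ := hres 3 (by norm_num) (by norm_num) c hc
          simp only [hrank, ra, rc]; omega
        · intro a ha c hc
          rw [List.mem_append] at ha
          obtain ⟨rc, hc3, -⟩ := hres 3 (by norm_num) (by norm_num) c hc
          rcases ha with ha | ha
          · obtain ⟨ra, -, hae⟩ := hres 1 (by norm_num) (by norm_num) a ha
            simp only [hrank, ra, rc]; omega
          · obtain ⟨ra, -, hae⟩ := hres 2 (by norm_num) (by norm_num) a ha
            simp only [hrank, ra, rc]; omega
    -- A's column order is a permutation of range(1, enine+1)
    have hcolmem : ∀ x, x ∈ cols ↔ 1 ≤ x ∧ x < e + 1 := by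
      intro x
      rcases hsy23 with h2 | h3
      · rw [hcols, if_pos h2]
        simp only [List.mem_append, List.mem_filter, PySem.List.mem_pyRange_one,
          decide_eq_true_eq, PySem.Int.mod_eq_emod_of_pos (show (0:Int) < 2 by norm_num)]
        omega
      · rw [hcols, if_neg (by rw [h3]; norm_num)]
        simp only [List.mem_append,
          PySem.List.mem_pyRange_iff_of_pos (show (0:Int) < 3 by norm_num)]
        omega
    have hcolperm : cols.Perm (PySem.List.pyRange 1 (e + 1) 1) := by
      rw [List.perm_ext_iff_of_nodup
        (hcolpw.imp (fun hab => fun hEq => absurd (congrArg rank hEq) (by simp [hab.ne])))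
        ((pv_pairwise_pyRange_pos 1 (e+1) one_pos).imp ne_of_lt)]
      intro x
      rw [hcolmem, PySem.List.mem_pyRange_one]
    -- rewrite A's appending double loop as a flatMap of maps
    rw [show ∀ l : List Int, l.foldl (fun koltuklar sira =>
          cols.foldl (fun acc sut => acc ++ [(sira, sut)]) koltuklar) [] =
          l.flatMap (fun sira => cols.map (fun sut => (sira, sut))) from fun l => by
        simp only [PySem.List.foldl_append_singleton_eq_map]
        simpa using PySem.List.foldl_append_eq_flatMap
          (fun sira => cols.map (fun sut => (sira, sut))) l []]
    symm
    apply pv_sorted2_eq_of_perm_of_pairwise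
    · exact List.Perm.flatMap_left _ (fun r _ => hcolperm.map _)
    · rw [List.flatMap_def, List.pairwise_flatten]
      constructor
      · intro l' hl'
        obtain ⟨r, -, rfl⟩ := List.mem_map.mp hl'
        rw [List.pairwise_map]
        exact hcolpw.imp (fun hab => Or.inr ⟨rfl, hab⟩)
      · rw [List.pairwise_map]
        refine (pv_pairwise_pyRange_pos 1 (b+1) one_pos).imp ?_
        intro r1 r2 h12 x hx y hy
        obtain ⟨c1, -, rfl⟩ := List.mem_map.mp hx
        obtain ⟨c2, -, rfl⟩ := List.mem_map.mp hy
        exact Or.inl h12
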